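-- pv_equiv track=rewrite | github.com/pjimpin1207/Programacion2526 | Tema1/Ejercicio34.py | reemplazar_vocales
-- ===== SOURCE A (Python) =====
-- def reemplazar_vocales(cadena):
--     vocales = "aeiouAEIOU"
--     contador = 0
--     nueva_cadena = ""
--
--     for letra in cadena:
--         if letra in vocales:
--             nueva_cadena += "X"
--             contador += 1
--         else:
--             nueva_cadena += letra
--
--     return contador, nueva_cadena
-- ===== SOURCE B (Python) =====
-- def reemplazar_vocales(cadena):
--     vocales = "aeiouAEIOU"
--     tabla = str.maketrans(vocales, "X" * len(vocales))
--     contador = sum(1 for letra in cadena if letra in vocales)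
--     return contador, cadena.translate(tabla)
-- ===== Notes on version B (the rewrite author's own statement) =====
-- stated objective: idiomatic
-- what changed: A's single char-by-char loop with a pair accumulator (count, growing string via += ) is replaced by two table-driven library passes: str.translate with a maketrans table for the replacement and a sum over a generator for the count.
import Mathlib
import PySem

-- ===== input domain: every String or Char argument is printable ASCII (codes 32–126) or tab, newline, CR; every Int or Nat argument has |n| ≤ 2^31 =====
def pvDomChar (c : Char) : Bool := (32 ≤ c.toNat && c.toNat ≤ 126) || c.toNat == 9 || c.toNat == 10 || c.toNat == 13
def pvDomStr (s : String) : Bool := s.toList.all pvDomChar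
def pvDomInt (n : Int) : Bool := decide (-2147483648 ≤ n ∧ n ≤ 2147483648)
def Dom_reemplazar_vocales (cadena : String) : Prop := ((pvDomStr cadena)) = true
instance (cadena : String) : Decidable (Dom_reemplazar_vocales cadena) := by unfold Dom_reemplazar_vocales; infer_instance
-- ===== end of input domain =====

-- B replaces A's single accumulating loop by two table-driven passes (a translate-style map for the new string and a separate count of vowels); objective: more idiomatic, same result.


-- ===== PORT A =====
-- A: one loop over the string, accumulating (contador, nueva_cadena) together.
def reemplazar_vocales (cadena : String) : Int × String :=
  let vocales : String := "aeiouAEIOU"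
  let r := cadena.toList.foldl
    (fun (st : Int × List Char) letra =>
      if vocales.toList.contains letra then (st.1 + 1, st.2 ++ ['X'])
      else (st.1, st.2 ++ [letra]))
    (0, [])
  (r.1, String.mk r.2)

-- ===== PORT B =====
-- B: two table-driven passes — a translation map for the new string, a sum for the count.
def pvVocales : List Char := "aeiouAEIOU".toList

def reemplazar_vocales_alt (cadena : String) : Int × String :=
  let contador : Int := cadena.toList.foldl
    (fun acc letra => if pvVocales.contains letra then acc + 1 else acc) 0
  let nueva := cadena.toList.map (fun letra => if pvVocales.contains letra then 'X' else letra)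
  (contador, String.mk nueva)

-- ===== PRECONDITION & SPEC =====
def Spec_reemplazar_vocales (cadena : String) (out : Int × String) : Prop := out = reemplazar_vocales_alt cadena
instance (cadena : String) (out : Int × String) : Decidable (Spec_reemplazar_vocales cadena out) := by unfold Spec_reemplazar_vocales; infer_instance

-- ===== CLAIM (what is proved, stated in full; the proofs are below) =====
def Claim_equal_reemplazar_vocales : Prop := ∀ (cadena : String), Dom_reemplazar_vocales cadena → Spec_reemplazar_vocales cadena (reemplazar_vocales cadena)

-- ===== LEMMAS AND PROOFS =====
theorem pv_cnt_shift (l : List Char) (a : Int) :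
    l.foldl (fun acc letra => if pvVocales.contains letra then acc + 1 else acc) a
    = a + l.foldl (fun acc letra => if pvVocales.contains letra then acc + 1 else acc) 0 := by
  induction l generalizing a with
  | nil => simp
  | cons c t ih =>
    simp only [List.foldl_cons]
    rw [ih, ih (if pvVocales.contains c then 0 + 1 else 0)]
    split_ifs <;> ring

theorem pv_fold_eq (l : List Char) (n : Int) (acc : List Char) :
    l.foldl (fun (st : Int × List Char) letra =>
      if pvVocales.contains letra then (st.1 + 1, st.2 ++ ['X'])
      else (st.1, st.2 ++ [letra])) (n, acc)
    = (n + l.foldl (fun a letra => if pvVocales.contains letra then a + 1 else a) 0,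
       acc ++ l.map (fun letra => if pvVocales.contains letra then 'X' else letra)) := by
  induction l generalizing n acc with
  | nil => simp
  | cons c t ih =>
    simp only [List.foldl_cons, List.map_cons]
    by_cases h : pvVocales.contains c
    · rw [if_pos h, if_pos h, if_pos h, ih, pv_cnt_shift t (0 + 1)]
      exact Prod.ext (by ring) (by simp)
    · rw [if_neg h, if_neg h, if_neg h, ih]
      simp

-- ===== VERDICT (by name: the statement is the Claim_ definition above) =====
theorem reemplazar_vocales_spec : Claim_equal_reemplazar_vocales := by
  intro cadena _
  unfold Spec_reemplazar_vocales reemplazar_vocales reemplazar_vocales_alt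
  show ((List.foldl _ ((0 : Int), ([] : List Char)) cadena.toList).1,
        String.mk (List.foldl _ ((0 : Int), ([] : List Char)) cadena.toList).2) = _
  rw [show "aeiouAEIOU".toList = pvVocales from rfl, pv_fold_eq]
  simp
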